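-- pv_equiv track=rewrite | github.com/ShopBonsai/interview-test-data-ml | main.py | remove_triplicates
-- ===== SOURCE A (Python) =====
-- def remove_triplicates(data_raw):
--     """
--     Removes triplicates
--
--     @param data_raw: list of lists of items grouped by customer_id
--     @return: original list of lists with triplicates removed
--     """
--     ret = []
--     for item in data_raw:
--         seen = []
--         dupl = []
--         for product in item:
--             if product not in seen:
--                 seen.append(product)
--             elif product not in dupl:
--                 dupl.append(product)
--         ret.append(seen + dupl)
--     return ret
-- ===== SOURCE B (Python) =====
-- def remove_triplicates(data_raw):
--     """
--     Removes triplicates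
--
--     @param data_raw: list of lists of items grouped by customer_id
--     @return: original list of lists with triplicates removed
--     """
--     ret = []
--     for item in data_raw:
--         # stream of elements that have already appeared earlier in item
--         repeats = [x for i, x in enumerate(item) if x in item[:i]]
--         ret.append(list(dict.fromkeys(item)) + list(dict.fromkeys(repeats)))
--     return ret
-- ===== Notes on version B (the rewrite author's own statement) =====
-- stated objective: alternative
-- what changed: Replaces A's stateful single loop with two seen/dupl accumulators by a stream transformation: a comprehension extracts the repeat-stream via prefix-slice membership (x in item[:i]), and one ordered-dedupe primitive (dict.fromkeys) is applied to the original stream and to the repeat-stream; their concatenation is the answer, with no membership-tracking accumulators at all.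
import Mathlib
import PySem

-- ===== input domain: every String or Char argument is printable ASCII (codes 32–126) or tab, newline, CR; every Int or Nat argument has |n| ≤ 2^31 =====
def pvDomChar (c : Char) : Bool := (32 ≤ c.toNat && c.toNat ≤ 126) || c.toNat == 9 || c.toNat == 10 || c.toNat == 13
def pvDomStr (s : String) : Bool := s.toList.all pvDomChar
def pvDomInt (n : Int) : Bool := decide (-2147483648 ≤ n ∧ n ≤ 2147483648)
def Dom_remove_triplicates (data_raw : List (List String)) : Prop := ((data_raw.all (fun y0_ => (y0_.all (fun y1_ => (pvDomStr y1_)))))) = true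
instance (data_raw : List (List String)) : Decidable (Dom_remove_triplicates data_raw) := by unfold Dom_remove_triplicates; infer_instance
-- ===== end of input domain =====

-- B replaces A's stateful seen/dupl classifier loop by a stream transformation:
-- extract the repeat-stream with a prefix-slice comprehension, then dedupe each stream once (alternative decomposition, same result).

-- ===== PORT A =====
-- inner loop of A: state (seen, dupl)
def remove_triplicates_step (sd : List String × List String) (product : String) :
    List String × List String :=
  if ¬ sd.1.contains product then (sd.1 ++ [product], sd.2)
  else if ¬ sd.2.contains product then (sd.1, sd.2 ++ [product])
  else sd

-- body of A's outer loop for one item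
def remove_triplicates_inner (item : List String) : List String :=
  let sd := item.foldl remove_triplicates_step ([], [])
  sd.1 ++ sd.2

def remove_triplicates (data_raw : List (List String)) : List (List String) :=
  data_raw.foldl (fun ret item => ret ++ [remove_triplicates_inner item]) []

-- ===== PORT B =====
-- repeats = [x for i, x in enumerate(item) if x in item[:i]]
def remove_triplicates_alt_repeats (item : List String) : List String :=
  (PySem.List.enumerate item).foldl
    (fun acc ix => if (PySem.List.slice item none (some ix.1)).contains ix.2
                   then acc ++ [ix.2] else acc) []

-- body of B's loop for one item: list(dict.fromkeys(item)) + list(dict.fromkeys(repeats))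
def remove_triplicates_alt_inner (item : List String) : List String :=
  PySem.List.dedup item ++ PySem.List.dedup (remove_triplicates_alt_repeats item)

def remove_triplicates_alt (data_raw : List (List String)) : List (List String) :=
  data_raw.foldl (fun ret item => ret ++ [remove_triplicates_alt_inner item]) []

-- ===== PRECONDITION & SPEC =====
def Spec_remove_triplicates (data_raw : List (List String)) (out : List (List String)) : Prop := out = remove_triplicates_alt data_raw
instance (data_raw : List (List String)) (out : List (List String)) : Decidable (Spec_remove_triplicates data_raw out) := by unfold Spec_remove_triplicates; infer_instance

-- ===== CLAIM (what is proved, stated in full; the proofs are below) =====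
def Claim_equal_remove_triplicates : Prop := ∀ (data_raw : List (List String)), Dom_remove_triplicates data_raw → Spec_remove_triplicates data_raw (remove_triplicates data_raw)

-- ===== LEMMAS AND PROOFS =====

-- snoc recurrence of B's repeat-stream: appending p contributes [p] iff p already occurs in t
theorem alt_repeats_snoc (t : List String) (p : String) :
    remove_triplicates_alt_repeats (t ++ [p])
      = remove_triplicates_alt_repeats t ++ (if t.contains p then [p] else []) := by
  unfold remove_triplicates_alt_repeats
  rw [PySem.List.enumerate_append, List.foldl_append]
  have hcongr :
      (PySem.List.enumerate t).foldl
        (fun acc ix => if (PySem.List.slice (t ++ [p]) none (some ix.1)).contains ix.2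
                       then acc ++ [ix.2] else acc) ([] : List String)
      = (PySem.List.enumerate t).foldl
        (fun acc ix => if (PySem.List.slice t none (some ix.1)).contains ix.2
                       then acc ++ [ix.2] else acc) ([] : List String) := by
    apply PySem.List.foldl_congr_mem
    intro acc ix hmem
    rcases (PySem.List.mem_enumerate_iff _ _ _).1 hmem with ⟨k, hk, hix⟩
    subst hix
    simp only [zero_add]
    rw [PySem.List.slice_to_natCast, PySem.List.slice_to_natCast,
        List.take_append_of_le_length (Nat.le_of_lt hk)]
  rw [hcongr]
  simp only [PySem.List.enumerate, List.foldl_cons, List.foldl_nil, zero_add]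
  rw [PySem.List.slice_to_natCast, List.take_left]
  by_cases hp : p ∈ t <;> simp [hp]

-- Set.ofList over a snoc
theorem ofList_snoc (t : List String) (p : String) :
    PySem.Set.ofList (t ++ [p]) = PySem.Set.add (PySem.Set.ofList t) p := by
  rw [PySem.Set.ofList_eq_foldl, PySem.Set.ofList_eq_foldl, List.foldl_append]
  rfl

-- joint invariant: A's fold state is exactly (dedup of the prefix, dedup of the prefix's repeat-stream)
theorem inner_pair (t : List String) :
    t.foldl remove_triplicates_step ([], [])
      = (PySem.Set.ofList t, PySem.Set.ofList (remove_triplicates_alt_repeats t)) := by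
  induction t using List.reverseRecOn with
  | nil => rfl
  | append_singleton t p ih =>
    rw [List.foldl_append, List.foldl_cons, List.foldl_nil, ih, alt_repeats_snoc,
        ofList_snoc]
    by_cases hp : p ∈ t
    · by_cases hd : p ∈ remove_triplicates_alt_repeats t
      · simp [remove_triplicates_step, PySem.Set.add, PySem.Set.contains,
              PySem.Set.mem_ofList, hp, hd, ofList_snoc]
      · simp [remove_triplicates_step, PySem.Set.add, PySem.Set.contains,
              PySem.Set.mem_ofList, hp, hd, ofList_snoc]
    · simp [remove_triplicates_step, PySem.Set.add, PySem.Set.contains,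
            PySem.Set.mem_ofList, hp]

theorem item_eq (item : List String) :
    remove_triplicates_inner item = remove_triplicates_alt_inner item := by
  unfold remove_triplicates_inner remove_triplicates_alt_inner
  rw [inner_pair]
  simp [PySem.List.dedup_eq_ofList]

-- ===== VERDICT (by name: the statement is the Claim_ definition above) =====
theorem remove_triplicates_spec : Claim_equal_remove_triplicates := by
  intro data_raw _
  unfold Spec_remove_triplicates remove_triplicates remove_triplicates_alt
  rw [PySem.List.foldl_append_singleton_eq_map, PySem.List.foldl_append_singleton_eq_map]
  exact congrArg _ (List.map_congr_left (fun item _ => item_eq item))
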